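-- pv_equiv track=rewrite | github.com/dmmagdal/Keras_Examples | Recommendation_Transformer/recommended_transformer.py | create_sequences
-- ===== SOURCE A (Python) =====
-- def create_sequences(values, window_size, step_size):
-- 	sequences = []
-- 	start_index = 0
-- 	while True:
-- 		end_index = start_index + window_size
-- 		seq = values[start_index:end_index]
-- 		if len(seq) < window_size:
-- 			seq = values[-window_size:]
-- 			if len(seq) == window_size:
-- 				sequences.append(seq)
-- 			break
-- 		sequences.append(seq)
-- 		start_index += step_size
-- 	return sequences
-- ===== SOURCE B (Python) =====
-- def create_sequences(values, window_size, step_size):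
-- 	if len(values) < window_size:
-- 		return []
-- 	# Transpose window_size shifted copies of the list: zip(*) yields every
-- 	# consecutive window of length window_size; subsample with a step slice
-- 	# and append the end-anchored tail window (the last consecutive window).
-- 	shifted = [values[i:] for i in range(window_size)]
-- 	windows = [list(t) for t in zip(*shifted)]
-- 	return windows[::step_size] + [windows[-1]]
-- ===== Notes on version B (the rewrite author's own statement) =====
-- stated objective: alternative
-- what changed: Instead of A's while-True index loop that slices each stepped window and breaks on a short slice, B transposes window_size shifted copies of the list with zip(*) to materialize every consecutive window at once, then subsamples them with a step slice windows[::step_size] and appends the last consecutive window as the end-anchored tail.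
-- outside the precondition, e.g. on create_sequences([1, 2, 3], 2, -1): A returns [[1, 2], [2, 3]], B returns [[2, 3], [1, 2], [2, 3]]
import Mathlib
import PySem

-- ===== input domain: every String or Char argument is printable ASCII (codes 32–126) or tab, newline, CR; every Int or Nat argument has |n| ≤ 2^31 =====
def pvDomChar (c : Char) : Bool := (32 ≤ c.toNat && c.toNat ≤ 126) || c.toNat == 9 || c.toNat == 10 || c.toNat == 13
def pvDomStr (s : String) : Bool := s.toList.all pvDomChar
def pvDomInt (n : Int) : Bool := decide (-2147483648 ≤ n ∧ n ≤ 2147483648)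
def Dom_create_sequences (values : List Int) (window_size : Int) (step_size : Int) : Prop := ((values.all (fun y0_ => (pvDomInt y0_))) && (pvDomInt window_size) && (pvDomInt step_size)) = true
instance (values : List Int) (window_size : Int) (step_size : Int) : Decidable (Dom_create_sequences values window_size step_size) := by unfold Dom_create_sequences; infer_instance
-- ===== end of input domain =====

-- B replaces A's while-True index loop by a zip-transpose of window_size shifted copies of the
-- list (all consecutive windows at once), a step-slice subsample and the end-anchored tail;
-- objective: alternative (no speed claim).

-- ===== PORT A =====
-- A's `while True` loop as fuel recursion; the fuel values.length + 1 is enough on Pre_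
-- (proved in csGo_spec below); under Pre_ the fuel-exhausted branch is never reached.
def csGo (values : List Int) (window_size step_size : Int) :
    Nat → Int → List (List Int) → List (List Int)
  | 0, _, sequences => sequences
  | fuel + 1, start_index, sequences =>
    let end_index := start_index + window_size
    let seq := PySem.List.slice values (some start_index) (some end_index)
    if (seq.length : Int) < window_size then
      let seq2 := PySem.List.slice values (some (-window_size)) none
      if (seq2.length : Int) = window_size then sequences ++ [seq2] else sequences
    else
      csGo values window_size step_size fuel (start_index + step_size) (sequences ++ [seq])

def create_sequences (values : List Int) (window_size : Int) (step_size : Int) : List (List Int) :=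
  csGo values window_size step_size (values.length + 1) 0 []

-- ===== PORT B =====
-- zip(*shifted): repeatedly collect the heads while every list is nonempty (and there is at
-- least one list — zip() of nothing is empty); fuel values.length + 1 bounds the iterations.
def zipStar : Nat → List (List Int) → List (List Int)
  | 0, _ => []
  | fuel + 1, lss =>
    if !lss.isEmpty && lss.all (fun l => !l.isEmpty) then
      (lss.map (fun l => l.headD 0)) :: zipStar fuel (lss.map List.tail)
    else []

-- windows[::k] — hand port of the step slice; exact for a positive step (Pre_ guarantees
-- step_size ≥ 1 whenever this line is reached).
def everyKth (k : Nat) : List (List Int) → List (List Int)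
  | [] => []
  | x :: rest => x :: everyKth k (rest.drop (k - 1))
termination_by l => l.length
decreasing_by simp only [List.length_drop, List.length_cons]; omega

def create_sequences_alt (values : List Int) (window_size : Int) (step_size : Int) : List (List Int) :=
  if (values.length : Int) < window_size then []
  else
    -- shifted = [values[i:] for i in range(window_size)]; windows = zip(*shifted)
    everyKth step_size.toNat
        (zipStar (values.length + 1)
          ((PySem.List.pyRange 0 window_size 1).map
            (fun i => PySem.List.slice values (some i) none)))
      ++ [((PySem.List.pyGet? (zipStar (values.length + 1)
              ((PySem.List.pyRange 0 window_size 1).map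
                (fun i => PySem.List.slice values (some i) none))) (-1)).getD [])]

-- ===== PRECONDITION & SPEC =====
-- Pre_ excludes nonpositive window size (A loops forever there) and nonpositive step when the
-- list is long enough to hold a window, where A loops forever (step 0) or returns windows
-- produced by negative-index wraparound (negative step) — outside the task's natural domain.
def Pre_create_sequences (values : List Int) (window_size : Int) (step_size : Int) : Prop :=
  1 ≤ window_size ∧ (1 ≤ step_size ∨ (values.length : Int) < window_size)
instance (values : List Int) (window_size : Int) (step_size : Int) : Decidable (Pre_create_sequences values window_size step_size) := by unfold Pre_create_sequences; infer_instance

def pvWitness_create_sequences : List Int × Int × Int := ([1, 2, 3, 4, 5], 3, 2)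

def Spec_create_sequences (values : List Int) (window_size : Int) (step_size : Int) (out : List (List Int)) : Prop := out = create_sequences_alt values window_size step_size
instance (values : List Int) (window_size : Int) (step_size : Int) (out : List (List Int)) : Decidable (Spec_create_sequences values window_size step_size out) := by unfold Spec_create_sequences; infer_instance

-- ===== CLAIM (what is proved, stated in full; the proofs are below) =====
def Claim_equal_create_sequences : Prop := ∀ (values : List Int) (window_size : Int) (step_size : Int), Dom_create_sequences values window_size step_size → Pre_create_sequences values window_size step_size → Spec_create_sequences values window_size step_size (create_sequences values window_size step_size)

-- ===== LEMMAS AND PROOFS =====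

theorem pyRange_pos_nil (a b s : Int) (hs : 0 < s) (h : b ≤ a) :
    PySem.List.pyRange a b s = [] := by
  rw [PySem.List.pyRange_of_pos a b hs]
  simp [show ¬ a < b by omega]

theorem pyRange_pos_cons (a b s : Int) (hs : 0 < s) (h : a < b) :
    PySem.List.pyRange a b s = a :: PySem.List.pyRange (a + s) b s := by
  rw [PySem.List.pyRange_of_pos a b hs, PySem.List.pyRange_of_pos (a + s) b hs]
  have hdiv : (b - a + s - 1) / s = (b - a - 1) / s + 1 := by
    rw [show b - a + s - 1 = (b - a - 1) + 1 * s by ring,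
        Int.add_mul_ediv_right (b - a - 1) 1 (show s ≠ 0 by omega)]
  have hM0 : 0 ≤ (b - a - 1) / s := Int.ediv_nonneg (by omega) (by omega)
  have hN : ((b - a + s - 1) / s).toNat = ((b - a - 1) / s).toNat + 1 := by
    rw [hdiv]; omega
  rw [if_pos h, hN, List.range_succ_eq_map]
  by_cases h2 : a + s < b
  · rw [if_pos h2]
    simp only [List.map_cons, List.map_map]
    congr 1
    · simp
    · have : b - (a + s) + s - 1 = b - a - 1 := by ring
      rw [this]
      apply List.map_congr_left
      intro k _
      simp only [Function.comp, Nat.succ_eq_add_one]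
      push_cast
      ring
  · rw [if_neg h2]
    have : (b - a - 1) / s = 0 := Int.ediv_eq_zero_of_lt (by omega) (by omega)
    simp [this]

theorem csGo_spec (values : List Int) (ws st : Int) (hw : 1 ≤ ws) (hs : 1 ≤ st) :
    ∀ (fuel : Nat) (start : Int) (acc : List (List Int)),
      0 ≤ start → (values.length : Int) - ws + 1 ≤ start + fuel →
      csGo values ws st (fuel + 1) start acc =
        acc ++ ((PySem.List.pyRange start ((values.length : Int) - ws + 1) st).map
                  (fun s => PySem.List.slice values (some s) (some (s + ws))))
            ++ (if ws ≤ (values.length : Int) then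
                  [PySem.List.slice values (some (-ws)) none] else []) := by
  intro fuel
  induction fuel with
  | zero =>
    intro start acc h0 hfuel
    have hshort : (values.length : Int) < start + ws := by omega
    have hlen : ((PySem.List.slice values (some start) (some (start + ws))).length : Int) < ws := by
      rw [PySem.List.length_slice]
      simp only [PySem.List.clampIdx]
      split_ifs <;> omega
    rw [csGo, if_pos hlen, pyRange_pos_nil _ _ _ (by omega) (by omega)]
    have hlen2 : (PySem.List.slice values (some (-ws)) none).length =
        values.length - PySem.List.clampIdx values.length (-ws) := by
      rw [PySem.List.slice_some_none, List.length_drop]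
    by_cases htail : ws ≤ (values.length : Int)
    · rw [if_pos htail, if_pos]
      · simp
      · simp only [hlen2, PySem.List.clampIdx]
        split_ifs <;> omega
    · rw [if_neg htail, if_neg]
      · simp
      · simp only [hlen2, PySem.List.clampIdx]
        split_ifs <;> omega
  | succ f ih =>
    intro start acc h0 hfuel
    by_cases hshort : (values.length : Int) < start + ws
    · -- identical to the break case above
      have hlen : ((PySem.List.slice values (some start) (some (start + ws))).length : Int) < ws := by
        rw [PySem.List.length_slice]
        simp only [PySem.List.clampIdx]
        split_ifs <;> omega
      rw [csGo, if_pos hlen, pyRange_pos_nil _ _ _ (by omega) (by omega)]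
      have hlen2 : (PySem.List.slice values (some (-ws)) none).length =
          values.length - PySem.List.clampIdx values.length (-ws) := by
        rw [PySem.List.slice_some_none, List.length_drop]
      by_cases htail : ws ≤ (values.length : Int)
      · rw [if_pos htail, if_pos]
        · simp
        · simp only [hlen2, PySem.List.clampIdx]
          split_ifs <;> omega
      · rw [if_neg htail, if_neg]
        · simp
        · simp only [hlen2, PySem.List.clampIdx]
          split_ifs <;> omega
    · -- full window: loop continues
      have hfull : start + ws ≤ (values.length : Int) := by omega
      have hlen : ¬ ((PySem.List.slice values (some start) (some (start + ws))).length : Int) < ws := by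
        rw [PySem.List.length_slice]
        simp only [PySem.List.clampIdx]
        split_ifs <;> omega
      rw [csGo, if_neg hlen]
      rw [ih (start + st) (acc ++ [PySem.List.slice values (some start) (some (start + ws))])
          (by omega) (by push_cast at hfuel ⊢; omega)]
      rw [pyRange_pos_cons start _ st (by omega) (by omega)]
      simp

-- heads of the shifted copies = the first window
theorem heads_shifted (vs : List Int) (w : Nat) (hw : w ≤ vs.length) :
    (List.range w).map (fun i => (vs.drop i).headD 0) = vs.take w := by
  apply List.ext_getElem
  · simp [hw]
  · intro i h1 h2
    simp only [List.getElem_map, List.getElem_range, List.getElem_take]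
    have hi : i < vs.length := by simp at h1; omega
    rw [List.headD_eq_head?, List.head?_drop, List.getElem?_eq_getElem hi]
    rfl

-- zipStar on the shifted copies produces every consecutive window
theorem zipStar_windows (w : Nat) (hw : 1 ≤ w) :
    ∀ (fuel : Nat) (vs : List Int), vs.length + 1 - w ≤ fuel →
      zipStar fuel ((List.range w).map (fun i => vs.drop i)) =
        (List.range (vs.length + 1 - w)).map (fun s => (vs.drop s).take w) := by
  intro fuel
  induction fuel with
  | zero =>
    intro vs hf
    have : vs.length + 1 - w = 0 := by omega
    simp [zipStar, this]
  | succ f ih =>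
    intro vs hf
    by_cases h : w ≤ vs.length
    · -- all shifted copies nonempty: emit the head window, recurse on the tail
      have hcond : (!((List.range w).map (fun i => vs.drop i)).isEmpty &&
          ((List.range w).map (fun i => vs.drop i)).all (fun l => !l.isEmpty)) = true := by
        simp only [Bool.and_eq_true, List.all_eq_true, List.mem_map, List.mem_range]
        constructor
        · simp [List.range_eq_nil]; omega
        · rintro l ⟨i, hi, rfl⟩
          simp [List.drop_eq_nil_iff]
          omega
      rw [zipStar, if_pos hcond]
      have htails : (((List.range w).map (fun i => vs.drop i)).map List.tail) =
          (List.range w).map (fun i => vs.tail.drop i) := by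
        rw [List.map_map]
        apply List.map_congr_left
        intro i _
        simp [Function.comp, List.tail_drop, List.drop_tail]
      have hheads : (((List.range w).map (fun i => vs.drop i)).map (fun l => l.headD 0)) =
          vs.take w := by
        rw [List.map_map]
        exact heads_shifted vs w h
      rw [htails, hheads, ih vs.tail (by simp only [List.length_tail]; omega)]
      have hlen : vs.length + 1 - w = (vs.tail.length + 1 - w) + 1 := by
        simp only [List.length_tail]; omega
      rw [hlen, List.range_succ_eq_map, List.map_cons, List.map_map]
      congr 1
      apply List.map_congr_left
      intro s _
      simp [Function.comp, List.drop_tail]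
    · -- too short: the last shifted copy is empty, zip stops at once; no windows either
      have hcond : ((List.range w).map (fun i => vs.drop i)).all (fun l => !l.isEmpty) = false := by
        rw [List.all_eq_false]
        refine ⟨vs.drop (w - 1), List.mem_map.mpr ⟨w - 1, List.mem_range.mpr (by omega), rfl⟩, ?_⟩
        have hnil : vs.drop (w - 1) = [] := List.drop_eq_nil_iff.mpr (by omega)
        simp [hnil]
      rw [zipStar, if_neg (by simp [hcond])]
      have : vs.length + 1 - w = 0 := by omega
      simp [this]

-- shifting a positive-step range
theorem pyRange_shift (a b s : Int) (hs : 0 < s) :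
    PySem.List.pyRange a b s = (PySem.List.pyRange 0 (b - a) s).map (· + a) := by
  rw [PySem.List.pyRange_of_pos a b hs, PySem.List.pyRange_of_pos 0 (b - a) hs]
  by_cases h : a < b
  · rw [if_pos h, if_pos (by omega)]
    rw [List.map_map]
    have : b - a - 0 = b - a := by ring
    rw [this]
    apply List.map_congr_left
    intro k _
    simp [Function.comp]; ring
  · rw [if_neg h, if_neg (by omega)]
    simp

-- the step slice over a range-indexed list of windows = map over the stepped pyRange
theorem everyKth_range_map (k : Nat) (hk : 1 ≤ k) :
    ∀ (m : Nat) (f : Nat → List Int), everyKth k ((List.range m).map f) =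
      (PySem.List.pyRange 0 (m : Int) (k : Int)).map (fun s => f s.toNat) := by
  intro m
  induction m using Nat.strong_induction_on with
  | _ m ih =>
    intro f
    match m with
    | 0 =>
      simp only [List.range_zero, List.map_nil, everyKth, Nat.cast_zero]
      rw [pyRange_pos_nil 0 0 k (by exact_mod_cast hk) (le_refl 0)]
      simp
    | m + 1 =>
      rw [List.range_succ_eq_map, List.map_cons, List.map_map]
      simp only [everyKth]
      have hdrop : (((List.range m).map (f ∘ Nat.succ)).drop (k - 1)) =
          (List.range (m - (k - 1))).map (fun i => f (i + k)) := by
        apply List.ext_getElem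
        · simp
        · intro i h1 h2
          simp only [List.getElem_drop, List.getElem_map, List.getElem_range, Function.comp]
          congr 1
          omega
      rw [hdrop]
      have hmk : m - (k - 1) = (m + 1) - k := by omega
      rw [hmk, ih ((m + 1) - k) (by omega) (fun i => f (i + k))]
      rw [show ((m + 1 : Nat) : Int) = (m : Int) + 1 by push_cast; ring]
      rw [pyRange_pos_cons 0 ((m : Int) + 1) k (by exact_mod_cast hk) (by omega),
          pyRange_shift (0 + k) ((m : Int) + 1) k (by exact_mod_cast hk)]
      rw [List.map_cons, List.map_map]
      congr 1
      have hcast : PySem.List.pyRange 0 (((m + 1 - k : Nat) : Int)) (k : Int) =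
          PySem.List.pyRange 0 ((m : Int) + 1 - (0 + k)) (k : Int) := by
        by_cases hkm : k ≤ m + 1
        · congr 1; push_cast; omega
        · rw [pyRange_pos_nil _ _ _ (by exact_mod_cast hk) (by omega),
              pyRange_pos_nil _ _ _ (by exact_mod_cast hk) (by omega)]
      rw [hcast]
      apply List.map_congr_left
      intro x hx
      have hx0 : 0 ≤ x := by
        have := (PySem.List.mem_pyRange_iff_of_pos (show (0:Int) < (k:Int) by exact_mod_cast hk) x).mp hx
        omega
      simp only [Function.comp]
      congr 1
      omega

theorem create_sequences_spec : Claim_equal_create_sequences := by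
  intro values ws st _ hpre
  obtain ⟨hw, hor⟩ := hpre
  rcases hor with hs | hn
  case inr =>
    -- too few values for one window: A breaks at once with an empty result, B returns []
    unfold Spec_create_sequences create_sequences create_sequences_alt
    rw [if_pos hn, csGo]
    rw [if_pos (by
      rw [PySem.List.length_slice]
      simp only [PySem.List.clampIdx]
      split_ifs <;> omega)]
    rw [if_neg (by
      rw [PySem.List.slice_some_none, List.length_drop]
      simp only [PySem.List.clampIdx]
      split_ifs <;> omega)]
  unfold Spec_create_sequences create_sequences
  have h := csGo_spec values ws st hw hs values.length 0 [] (by omega) (by omega)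
  rw [h]
  unfold create_sequences_alt
  by_cases hlt : (values.length : Int) < ws
  · rw [if_pos hlt, pyRange_pos_nil _ _ _ (by omega) (by omega),
        if_neg (by omega)]
    simp
  · rw [if_neg hlt, if_pos (by omega)]
    -- B's shifted copies as plain drops
    have hshift : ((PySem.List.pyRange 0 ws 1).map
        (fun i => PySem.List.slice values (some i) none)) =
        (List.range ws.toNat).map (fun i => values.drop i) := by
      rw [PySem.List.pyRange_one, List.map_map]
      have : (ws - 0).toNat = ws.toNat := by omega
      rw [this]
      apply List.map_congr_left
      intro i _
      simp only [Function.comp]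
      rw [show ((0 : Int) + (i : Int)) = (i : Int) by ring, PySem.List.slice_from_natCast]
    rw [hshift, zipStar_windows ws.toNat (by omega) (values.length + 1) values (by omega)]
    -- windows = all consecutive windows; its last element is the tail window
    have hm1 : 1 ≤ values.length + 1 - ws.toNat := by omega
    have hlast : (PySem.List.pyGet? ((List.range (values.length + 1 - ws.toNat)).map
        (fun s => (values.drop s).take ws.toNat)) (-1)).getD [] =
        PySem.List.slice values (some (-ws)) none := by
      rw [PySem.List.pyGet?_neg_one]
      rw [List.getLast?_eq_getElem?]
      simp only [List.length_map, List.length_range]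
      rw [List.getElem?_map, List.getElem?_range (by omega)]
      simp only [Option.map_some, Option.getD_some]
      rw [PySem.List.slice_some_none]
      have hc : PySem.List.clampIdx values.length (-ws) = values.length - ws.toNat := by
        simp only [PySem.List.clampIdx]
        split_ifs <;> omega
      rw [hc, show values.length + 1 - ws.toNat - 1 = values.length - ws.toNat by omega]
      apply List.take_of_length_le
      simp
      omega
    rw [hlast, everyKth_range_map st.toNat (by omega) (values.length + 1 - ws.toNat)]
    congr 1
    have hb : ((values.length + 1 - ws.toNat : Nat) : Int) = (values.length : Int) - ws + 1 := by
      omega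
    have hst : ((st.toNat : Nat) : Int) = st := by omega
    rw [hb, hst]
    apply List.map_congr_left
    intro s hsm
    have hs0 : 0 ≤ s := by
      have := (PySem.List.mem_pyRange_iff_of_pos (show (0:Int) < st by omega) s).mp hsm
      omega
    rw [PySem.List.slice_toNat values hs0 (by omega)]
    congr 1
    omega
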